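-- pv_equiv track=rewrite | github.com/KIRILLFABER/Compress-alg | bwt.py | counting_sort_arg_bytes
-- ===== SOURCE A (Python) =====
-- def counting_sort_arg_bytes(S):
--     N = len(S)
--     if N == 0:
--         return []
--
--     M = 256
--
--     counts = [0] * M
--     for b in S:
--         counts[b] += 1
--
--     pos = [0] * M
--     for i in range(1, M):
--         pos[i] = pos[i-1] + counts[i-1]
--
--     P_inverse = [0] * N
--     temp_pos = pos.copy()
--     for i, b in enumerate(S):
--         P_inverse[temp_pos[b]] = i
--         temp_pos[b] += 1
--
--     return P_inverse
-- ===== SOURCE B (Python) =====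
-- def counting_sort_arg_bytes(S):
--     return sorted(range(len(S)), key=lambda i: S[i])
-- ===== Notes on version B (the rewrite author's own statement) =====
-- stated objective: idiomatic
-- what changed: Replaces the three-pass counting sort (count table, cumulative position table, scatter pass) with a single stable comparison sort of the index range keyed by byte value, relying on sorted()'s stability for the tie order.
-- outside the precondition, e.g. on counting_sort_arg_bytes([-1, 0]): A returns [1, 0], B returns [0, 1]
import Mathlib
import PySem

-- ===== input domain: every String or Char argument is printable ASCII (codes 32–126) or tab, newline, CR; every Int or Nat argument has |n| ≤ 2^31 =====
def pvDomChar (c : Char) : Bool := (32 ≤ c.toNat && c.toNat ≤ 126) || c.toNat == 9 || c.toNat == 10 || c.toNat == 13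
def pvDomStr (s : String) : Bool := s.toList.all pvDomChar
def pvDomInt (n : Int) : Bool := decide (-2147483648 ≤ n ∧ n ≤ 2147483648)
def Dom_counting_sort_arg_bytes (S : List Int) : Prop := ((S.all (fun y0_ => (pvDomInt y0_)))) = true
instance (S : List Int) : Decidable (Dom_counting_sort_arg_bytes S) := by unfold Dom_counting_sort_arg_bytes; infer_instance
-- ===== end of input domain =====

-- B replaces the three-pass counting sort with one stable comparison sort of the index range (idiomatic; not faster).

-- ===== PORT A =====
def counting_sort_arg_bytes (S : List Int) : List Int :=
  let N : Int := (S.length : Int)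
  if N = 0 then []
  else
    let counts : List Int :=
      S.foldl (fun c b => PySem.List.pySetD c b (PySem.List.pyGetD c b 0 + 1))
        (List.replicate 256 (0 : Int))
    let pos : List Int :=
      (PySem.List.pyRange 1 256 1).foldl
        (fun p i => PySem.List.pySetD p i
          (PySem.List.pyGetD p (i - 1) 0 + PySem.List.pyGetD counts (i - 1) 0))
        (List.replicate 256 (0 : Int))
    let fin :=
      (PySem.List.enumerate S).foldl
        (fun (st : List Int × List Int) ib =>
          (PySem.List.pySetD st.1 (PySem.List.pyGetD st.2 ib.2 0) ib.1,
           PySem.List.pySetD st.2 ib.2 (PySem.List.pyGetD st.2 ib.2 0 + 1)))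
        (List.replicate N.toNat (0 : Int), pos)
    fin.1

-- ===== PORT B =====
def counting_sort_arg_bytes_alt (S : List Int) : List Int :=
  PySem.List.sorted (PySem.List.pyRange 0 (S.length : Int) 1)
    (fun i => PySem.List.pyGetD S i 0)

-- ===== PRECONDITION & SPEC =====
-- The function argsorts a byte string. Pre_ excludes (i) elements ≥ 256 or < -256, on which A
-- raises IndexError, and (ii) mixed-sign lists, where A returns an ordering keyed through
-- Python's negative-index wraparound (a negative entry is counted as b+256 and so placed after
-- every nonnegative one) — an artefact of the 256-entry count table that no caller of a byte
-- argsort would specify; B sorts by actual value there. Sign-homogeneous lists are kept: on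
-- them A's ordering coincides with the stable argsort by value.
def Pre_counting_sort_arg_bytes (S : List Int) : Prop :=
  (∀ b ∈ S, -256 ≤ b ∧ b < 256) ∧ ((∀ b ∈ S, 0 ≤ b) ∨ (∀ b ∈ S, b < 0))
instance (S : List Int) : Decidable (Pre_counting_sort_arg_bytes S) := by
  unfold Pre_counting_sort_arg_bytes; infer_instance

def pvWitness_counting_sort_arg_bytes : List Int := [3, 1, 3, 0, 255]

def Spec_counting_sort_arg_bytes (S : List Int) (out : List Int) : Prop :=
  out = counting_sort_arg_bytes_alt S
instance (S : List Int) (out : List Int) : Decidable (Spec_counting_sort_arg_bytes S out) := by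
  unfold Spec_counting_sort_arg_bytes; infer_instance

-- ===== CLAIM (what is proved, stated in full; the proofs are below) =====
def Claim_equal_counting_sort_arg_bytes : Prop := ∀ (S : List Int), Dom_counting_sort_arg_bytes S → Pre_counting_sort_arg_bytes S → Spec_counting_sort_arg_bytes S (counting_sort_arg_bytes S)

-- ===== LEMMAS AND PROOFS =====

def pvKey (S : List Int) (i : Int) : Int := PySem.List.pyGetD S i 0
def pvOcc (S : List Int) (v : Int) : List Int :=
  (PySem.List.pyRange 0 (S.length : Int) 1).filter (fun i => pvKey S i == v)
def pvPS (S : List Int) (v : Nat) : Nat := S.countP (fun x => decide (x < (v : Int)))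

-- prefix of the index range maps to the prefix of S
lemma pv_map_range_take (S : List Int) (k : Nat) (hk : k ≤ S.length) :
    (PySem.List.pyRange 0 (k : Int) 1).map (fun i => PySem.List.pyGetD S i 0) = S.take k := by
  rw [PySem.List.pyRange_one, List.map_map]
  apply List.ext_getElem
  · simp [hk]
  · intro i h1 h2
    simp only [List.getElem_map, List.getElem_range, Function.comp_apply, List.getElem_take]
    have : (0 : Int) + (i : Int) = ((i : Nat) : Int) := by omega
    rw [this, PySem.List.pyGetD_natCast]
    have hi : i < S.length := by simp at h1; omega
    simp [List.getD_eq_getElem?_getD, List.getElem?_eq_getElem hi]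

lemma pv_occ_len_take (S : List Int) (k : Nat) (hk : k ≤ S.length) (v : Int) :
    ((PySem.List.pyRange 0 (k : Int) 1).filter (fun i => pvKey S i == v)).length
      = (S.take k).count v := by
  rw [← List.countP_eq_length_filter, List.count_eq_countP, ← pv_map_range_take S k hk,
    List.countP_map]
  rfl

lemma pv_occ_len (S : List Int) (v : Int) : (pvOcc S v).length = S.count v := by
  have := pv_occ_len_take S S.length le_rfl v
  simpa [pvOcc] using this

-- psum facts
lemma pv_ps_zero (S : List Int) (hPre : ∀ b ∈ S, 0 ≤ b ∧ b < 256) : pvPS S 0 = 0 := by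
  simp only [pvPS, List.countP_eq_zero]
  intro x hx
  have := hPre x hx
  simp only [decide_eq_true_eq]
  omega

lemma pv_countP_split (w : Int) (S : List Int) :
    S.countP (fun x => decide (x < w + 1))
      = S.countP (fun x => decide (x < w)) + S.countP (fun x => x == w) := by
  induction S with
  | nil => simp
  | cons b S ih =>
    simp only [List.countP_cons, ih]
    have h : ((b < w + 1)) ↔ (b < w ∨ b = w) := by omega
    by_cases hb : b = w <;> by_cases hlt : b < w <;> simp [h, hb, hlt] <;> omega

lemma pv_ps_succ (S : List Int) (v : Nat) :
    pvPS S (v + 1) = pvPS S v + S.count (v : Int) := by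
  unfold pvPS
  rw [List.count_eq_countP]
  have hcast : (((v + 1 : Nat)) : Int) = (v : Int) + 1 := by push_cast; ring
  rw [hcast, pv_countP_split]

lemma pv_ps_mono (S : List Int) {u v : Nat} (h : u ≤ v) : pvPS S u ≤ pvPS S v := by
  induction v with
  | zero => simp_all
  | succ n ih =>
    rcases Nat.lt_or_ge u (n+1) with h' | h'
    · exact le_trans (ih (by omega)) (by rw [pv_ps_succ]; omega)
    · have : u = n + 1 := by omega
      simp [this]

lemma pv_ps_top (S : List Int) (hPre : ∀ b ∈ S, 0 ≤ b ∧ b < 256) :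
    pvPS S 256 = S.length := by
  unfold pvPS
  rw [List.countP_eq_length_filter, List.filter_eq_self.mpr]
  intro a ha
  simp only [decide_eq_true_eq]
  have := hPre a ha
  omega

lemma pv_occ_mem (S : List Int) (v i : Int) (h : i ∈ pvOcc S v) :
    pvKey S i = v ∧ 0 ≤ i ∧ i < (S.length : Int) := by
  rw [pvOcc, List.mem_filter] at h
  obtain ⟨h1, h2⟩ := h
  rw [PySem.List.mem_pyRange_one] at h1
  exact ⟨by simpa using h2, h1.1, h1.2⟩

lemma pv_occ_pairwise (S : List Int) (v : Int) : (pvOcc S v).Pairwise (· < ·) :=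
  (PySem.List.pairwise_lt_pyRange_one 0 (S.length : Int)).filter _

lemma pv_occ_nth (S : List Int) (k : Nat) (hk : k < S.length) (b : Int)
    (hb : pvKey S (k : Int) = b) :
    (S.take k).count b < S.count b ∧
      (pvOcc S b).getD ((S.take k).count b) 0 = (k : Int) := by
  have hsplit : PySem.List.pyRange 0 (S.length : Int) 1
      = PySem.List.pyRange 0 (k : Int) 1 ++ PySem.List.pyRange (k : Int) (S.length : Int) 1 :=
    PySem.List.pyRange_one_append 0 (k : Int) (S.length : Int) (by omega) (by omega)
  have hcons : PySem.List.pyRange (k : Int) (S.length : Int) 1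
      = (k : Int) :: PySem.List.pyRange ((k : Int) + 1) (S.length : Int) 1 :=
    PySem.List.pyRange_one_cons (by omega)
  have hocc : pvOcc S b
      = ((PySem.List.pyRange 0 (k : Int) 1).filter (fun i => pvKey S i == b))
        ++ (k : Int) :: ((PySem.List.pyRange ((k : Int) + 1) (S.length : Int) 1).filter (fun i => pvKey S i == b)) := by
    rw [pvOcc, hsplit, hcons, List.filter_append, List.filter_cons]
    simp [hb]
  have hlen : ((PySem.List.pyRange 0 (k : Int) 1).filter (fun i => pvKey S i == b)).length
      = (S.take k).count b := pv_occ_len_take S k (le_of_lt hk) b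
  constructor
  · have := pv_occ_len S b
    rw [hocc] at this
    simp only [List.length_append, List.length_cons] at this
    omega
  · rw [hocc, List.getD_eq_getElem?_getD, List.getElem?_append_right hlen.le, hlen]
    simp

def pvSum (counts : List Int) (v : Nat) : Int :=
  ((List.range v).map (fun w => counts.getD w 0)).sum

lemma pv_getD_replicate (v : Nat) : (List.replicate 256 (0 : Int)).getD v 0 = 0 := by
  rw [List.getD_eq_getElem?_getD, List.getElem?_replicate]
  split <;> rfl

lemma pv_counts_spec : ∀ (l : List Int) (c : List Int),
    (∀ b ∈ l, 0 ≤ b ∧ b < (c.length : Int)) →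
    (l.foldl (fun c b => PySem.List.pySetD c b (PySem.List.pyGetD c b 0 + 1)) c).length = c.length ∧
    ∀ v : Nat, v < c.length →
      (l.foldl (fun c b => PySem.List.pySetD c b (PySem.List.pyGetD c b 0 + 1)) c).getD v 0
        = c.getD v 0 + l.count (v : Int) := by
  intro l
  induction l with
  | nil => intro c _; simp
  | cons b l ih =>
    intro c hb
    obtain ⟨hb1, hb2⟩ := hb b List.mem_cons_self
    have hbn : b.toNat < c.length := by omega
    simp only [List.foldl_cons]
    rw [PySem.List.pySetD_of_nonneg _ _ hb1, PySem.List.pyGetD_of_nonneg _ _ hb1]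
    have hlen : (c.set b.toNat (c.getD b.toNat 0 + 1)).length = c.length := by simp
    obtain ⟨ihl, ihv⟩ := ih (c.set b.toNat (c.getD b.toNat 0 + 1))
      (by rw [hlen]; exact fun x hx => hb x (List.mem_cons_of_mem _ hx))
    refine ⟨by rw [ihl, hlen], ?_⟩
    intro v hv
    rw [ihv v (by omega), List.count_cons]
    by_cases hvb : v = b.toNat
    · subst hvb
      have hbeq : (b == ((b.toNat : Nat) : Int)) = true := by simp; omega
      rw [List.getD_eq_getElem?_getD, List.getElem?_set, if_pos rfl, if_pos hbn,
        Option.getD_some, hbeq, if_pos rfl, List.getD_eq_getElem?_getD]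
      push_cast
      ring
    · have hbeq : (b == ((v : Nat) : Int)) = false := by simp; omega
      rw [List.getD_eq_getElem?_getD, List.getElem?_set,
        if_neg (fun h => hvb h.symm), hbeq, ← List.getD_eq_getElem?_getD]
      simp

lemma pv_pos_spec (counts : List Int) : ∀ (n : Nat), n ≤ 256 →
    ((PySem.List.pyRange 1 (n : Int) 1).foldl
      (fun p i => PySem.List.pySetD p i
        (PySem.List.pyGetD p (i - 1) 0 + PySem.List.pyGetD counts (i - 1) 0))
      (List.replicate 256 (0 : Int))).length = 256 ∧
    (∀ v : Nat, v < n →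
      ((PySem.List.pyRange 1 (n : Int) 1).foldl
        (fun p i => PySem.List.pySetD p i
          (PySem.List.pyGetD p (i - 1) 0 + PySem.List.pyGetD counts (i - 1) 0))
        (List.replicate 256 (0 : Int))).getD v 0 = pvSum counts v) ∧
    (∀ v : Nat, n ≤ v → v < 256 →
      ((PySem.List.pyRange 1 (n : Int) 1).foldl
        (fun p i => PySem.List.pySetD p i
          (PySem.List.pyGetD p (i - 1) 0 + PySem.List.pyGetD counts (i - 1) 0))
        (List.replicate 256 (0 : Int))).getD v 0 = 0) := by
  intro n
  induction n with
  | zero =>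
    intro _
    rw [PySem.List.pyRange_one_eq_nil (by omega), List.foldl_nil]
    exact ⟨List.length_replicate, by omega, fun v _ _ => pv_getD_replicate v⟩
  | succ n ih =>
    intro hn
    obtain ⟨ihl, ihv, ihz⟩ := ih (by omega)
    by_cases hn0 : n = 0
    · subst hn0
      rw [PySem.List.pyRange_one_eq_nil (by omega), List.foldl_nil]
      refine ⟨List.length_replicate, ?_, fun v _ _ => pv_getD_replicate v⟩
      intro v hv
      have hv0 : v = 0 := by omega
      subst hv0
      rw [pv_getD_replicate 0, pvSum, List.range_zero, List.map_nil, List.sum_nil]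
    · obtain ⟨m, rfl⟩ : ∃ m, n = m + 1 := ⟨n - 1, by omega⟩
      have hsplit : PySem.List.pyRange 1 ((m + 1 + 1 : Nat) : Int) 1
          = PySem.List.pyRange 1 ((m + 1 : Nat) : Int) 1 ++ [((m + 1 : Nat) : Int)] := by
        have h := PySem.List.pyRange_one_succ_right (a := 1) (b := ((m + 1 : Nat) : Int)) (by push_cast; omega)
        have hc : ((m + 1 + 1 : Nat) : Int) = ((m + 1 : Nat) : Int) + 1 := by push_cast; ring
        rw [hc, h]
      rw [hsplit, List.foldl_append]
      set p := (PySem.List.pyRange 1 ((m + 1 : Nat) : Int) 1).foldl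
        (fun p i => PySem.List.pySetD p i
          (PySem.List.pyGetD p (i - 1) 0 + PySem.List.pyGetD counts (i - 1) 0))
        (List.replicate 256 (0 : Int)) with hp
      simp only [List.foldl_cons, List.foldl_nil]
      have hcast : ((m + 1 : Nat) : Int) - 1 = ((m : Nat) : Int) := by push_cast; ring
      rw [PySem.List.pySetD_of_nonneg _ _ (by push_cast; omega), hcast,
        PySem.List.pyGetD_natCast, PySem.List.pyGetD_natCast]
      have htn : (((m + 1 : Nat) : Int)).toNat = m + 1 := by omega
      rw [htn]
      have hlp : m + 1 < p.length := by rw [ihl]; omega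
      have hval : p.getD m 0 + counts.getD m 0 = pvSum counts (m + 1) := by
        rw [ihv m (by omega)]
        simp only [pvSum]
        rw [List.range_succ, List.map_append, List.sum_append, List.map_cons,
          List.map_nil, List.sum_cons, List.sum_nil]
        ring
      refine ⟨by rw [List.length_set, ihl], ?_, ?_⟩
      · intro v hv
        by_cases hvn : v = m + 1
        · subst hvn
          rw [List.getD_eq_getElem?_getD, List.getElem?_set, if_pos rfl, if_pos hlp,
            Option.getD_some, hval]
        · rw [List.getD_eq_getElem?_getD, List.getElem?_set,
            if_neg (fun h => hvn h.symm), ← List.getD_eq_getElem?_getD]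
          exact ihv v (by omega)
      · intro v hv h256
        rw [List.getD_eq_getElem?_getD, List.getElem?_set,
          if_neg (by omega), ← List.getD_eq_getElem?_getD]
        exact ihz v (by omega) h256

lemma pv_sum_eq_ps (counts S : List Int) (hPre : ∀ b ∈ S, 0 ≤ b ∧ b < 256)
    (hc : ∀ w : Nat, w < 256 → counts.getD w 0 = (S.count (w : Int) : Int)) :
    ∀ v : Nat, v ≤ 256 → pvSum counts v = (pvPS S v : Int) := by
  intro v
  induction v with
  | zero =>
    intro _
    rw [pvSum, List.range_zero, List.map_nil, List.sum_nil, pv_ps_zero S hPre]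
    rfl
  | succ v ih =>
    intro hv
    rw [pvSum, List.range_succ, List.map_append, List.sum_append, List.map_cons,
      List.map_nil, List.sum_cons, List.sum_nil, pv_ps_succ]
    have := ih (by omega)
    rw [pvSum] at this
    rw [this, hc v (by omega)]
    push_cast
    ring

lemma pv_loop (S : List Int) (hPre : ∀ b ∈ S, 0 ≤ b ∧ b < 256) :
    ∀ (l : List Int) (k : Nat) (arr tp : List Int),
    S.drop k = l → k ≤ S.length →
    arr.length = S.length → tp.length = 256 →
    (∀ v : Nat, v < 256 →
      tp.getD v 0 = (pvPS S v : Int) + ((S.take k).count (v : Int) : Int)) →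
    (∀ v : Nat, v < 256 → ∀ r : Nat, r < (S.take k).count (v : Int) →
      arr.getD (pvPS S v + r) 0 = (pvOcc S (v : Int)).getD r 0) →
    ((PySem.List.enumerate l (k : Int)).foldl
      (fun (st : List Int × List Int) ib =>
        (PySem.List.pySetD st.1 (PySem.List.pyGetD st.2 ib.2 0) ib.1,
         PySem.List.pySetD st.2 ib.2 (PySem.List.pyGetD st.2 ib.2 0 + 1)))
      (arr, tp)).1.length = S.length ∧
    ∀ v : Nat, v < 256 → ∀ r : Nat, r < S.count (v : Int) →
      ((PySem.List.enumerate l (k : Int)).foldl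
        (fun (st : List Int × List Int) ib =>
          (PySem.List.pySetD st.1 (PySem.List.pyGetD st.2 ib.2 0) ib.1,
           PySem.List.pySetD st.2 ib.2 (PySem.List.pyGetD st.2 ib.2 0 + 1)))
        (arr, tp)).1.getD (pvPS S v + r) 0 = (pvOcc S (v : Int)).getD r 0 := by
  intro l
  induction l with
  | nil =>
    intro k arr tp hdrop hk harrlen _ _ harr
    have hkeq : k = S.length := by
      have := congrArg List.length hdrop
      simp at this
      omega
    subst hkeq
    rw [PySem.List.enumerate_nil, List.foldl_nil]
    refine ⟨harrlen, ?_⟩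
    intro v hv r hr
    exact harr v hv r (by rwa [List.take_length])
  | cons b l ih =>
    intro k arr tp hdrop hk harrlen htplen htp harr
    have hklt : k < S.length := by
      by_contra h
      rw [List.drop_eq_nil_of_le (by omega)] at hdrop
      exact List.cons_ne_nil b l hdrop.symm
    have hSk : S.getD k 0 = b := by
      have h0 : (S.drop k).getD 0 0 = b := by rw [hdrop]; rfl
      rwa [List.getD_eq_getElem?_getD, List.getElem?_drop, Nat.add_zero,
        ← List.getD_eq_getElem?_getD] at h0
    have hdrop' : S.drop (k + 1) = l := by
      have h2 : (S.drop k).tail = l := by rw [hdrop]; rfl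
      rwa [List.tail_drop] at h2
    have hgetk : S[k]? = some b := by
      rw [List.getElem?_eq_getElem hklt]
      rw [List.getD_eq_getElem?_getD, List.getElem?_eq_getElem hklt] at hSk
      simpa using hSk
    have hbmem : b ∈ S := by
      have : S[k] = b := by simpa [List.getElem?_eq_getElem hklt] using hgetk
      exact this ▸ List.getElem_mem hklt
    obtain ⟨hb0, hb256⟩ := hPre b hbmem
    have hbc : ((b.toNat : Nat) : Int) = b := by omega
    have hbn : b.toNat < 256 := by omega
    have hkey : pvKey S (k : Int) = b := by
      rw [pvKey, PySem.List.pyGetD_natCast, hSk]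
    obtain ⟨hrb, hocc⟩ := pv_occ_nth S k hklt b hkey
    have hcount_take : (S.take k).count ((b.toNat : Nat) : Int) = (S.take k).count b := by
      rw [hbc]
    have hq : PySem.List.pyGetD tp b 0
        = (pvPS S b.toNat : Int) + ((S.take k).count b : Int) := by
      rw [PySem.List.pyGetD_of_nonneg _ _ hb0, htp b.toNat hbn, hcount_take]
    have hqlt : pvPS S b.toNat + (S.take k).count b < S.length := by
      have h1 : (S.take k).count b < S.count b := hrb
      have h2 : pvPS S b.toNat + S.count ((b.toNat : Nat) : Int) = pvPS S (b.toNat + 1) :=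
        (pv_ps_succ S b.toNat).symm
      have h3 : pvPS S (b.toNat + 1) ≤ pvPS S 256 := pv_ps_mono S (by omega)
      have h4 : pvPS S 256 = S.length := pv_ps_top S hPre
      rw [hbc] at h2
      omega
    have hstep : (PySem.List.pySetD arr (PySem.List.pyGetD tp b 0) ((k : Nat) : Int),
         PySem.List.pySetD tp b (PySem.List.pyGetD tp b 0 + 1))
        = (arr.set (pvPS S b.toNat + (S.take k).count b) ((k : Nat) : Int),
           tp.set b.toNat ((pvPS S b.toNat : Int) + ((S.take k).count b : Int) + 1)) := by
      rw [hq, PySem.List.pySetD_of_nonneg _ _ hb0]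
      have hcast : (pvPS S b.toNat : Int) + ((S.take k).count b : Int)
          = ((pvPS S b.toNat + (S.take k).count b : Nat) : Int) := by push_cast; ring
      rw [hcast, PySem.List.pySetD_natCast]
    have htake : S.take (k + 1) = S.take k ++ [b] := by
      rw [List.take_add_one, hgetk]
      rfl
    rw [PySem.List.enumerate_cons]
    simp only [List.foldl_cons]
    rw [hstep]
    have hcast1 : (k : Int) + 1 = ((k + 1 : Nat) : Int) := by push_cast; ring
    rw [hcast1]
    apply ih (k + 1) _ _ hdrop' (by omega) (by rw [List.length_set]; exact harrlen)
      (by rw [List.length_set]; exact htplen)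
    · -- htp'
      intro v hv
      have hsing : ∀ x y : Int, List.count x [y] = if x == y then 1 else 0 := by
        intro x y
        rw [List.count_cons, List.count_nil]
        by_cases hxy : x = y
        · subst hxy
          simp
        · simp only [Nat.zero_add]
          rw [if_neg (by simpa using fun h => hxy h.symm), if_neg (by simpa using hxy)]
      by_cases hvb : v = b.toNat
      · subst hvb
        rw [List.getD_eq_getElem?_getD, List.getElem?_set, if_pos rfl,
          if_pos (by rw [htplen]; omega), Option.getD_some, htake, List.count_append,
          hbc, hsing, if_pos (by simp)]
        push_cast
        ring
      · rw [List.getD_eq_getElem?_getD, List.getElem?_set, if_neg (fun h => hvb h.symm),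
          ← List.getD_eq_getElem?_getD, htp v hv, htake, List.count_append, hsing,
          if_neg (by simp; omega)]
        push_cast
        ring
    · -- harr'
      intro v hv r hr
      have hsing2 : ∀ x y : Int, List.count x [y] = if x = y then 1 else 0 := by
        intro x y
        rw [List.count_cons, List.count_nil]
        by_cases hxy : x = y
        · subst hxy
          simp
        · simp only [Nat.zero_add]
          rw [if_neg (by simpa using fun h => hxy h.symm), if_neg (by simpa using hxy)]
      rw [htake, List.count_append, hsing2] at hr
      have hcntle : List.count ((v : Nat) : Int) (List.take k S) ≤ List.count ((v : Nat) : Int) S :=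
        (List.take_sublist k S).count_le _
      by_cases hvb : v = b.toNat
      · subst hvb
        rw [if_pos hbc] at hr
        rw [hcount_take] at hr hcntle
        by_cases hr2 : r = List.count b (List.take k S)
        · subst hr2
          rw [List.getD_eq_getElem?_getD, List.getElem?_set, if_pos rfl,
            if_pos (by rw [harrlen]; exact hqlt), Option.getD_some, hbc]
          exact hocc.symm
        · have hrlt : r < List.count b (List.take k S) := by omega
          rw [List.getD_eq_getElem?_getD, List.getElem?_set, if_neg (by omega),
            ← List.getD_eq_getElem?_getD]
          exact harr b.toNat hv r (by rwa [hcount_take])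
      · rw [if_neg (by omega)] at hr
        have hr' : r < List.count ((v : Nat) : Int) (List.take k S) := by omega
        have hrS : r < List.count ((v : Nat) : Int) S := by omega
        have hv1 : pvPS S v + r < pvPS S (v + 1) := by
          have := pv_ps_succ S v
          omega
        have hb1 : pvPS S b.toNat + List.count b (List.take k S) < pvPS S (b.toNat + 1) := by
          have := pv_ps_succ S b.toNat
          rw [hbc] at this
          omega
        have hne : pvPS S v + r ≠ pvPS S b.toNat + List.count b (List.take k S) := by
          rcases Nat.lt_or_ge v b.toNat with hlt | hge
          · have : pvPS S (v + 1) ≤ pvPS S b.toNat := pv_ps_mono S (by omega)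
            omega
          · have hgt : b.toNat < v := by omega
            have : pvPS S (b.toNat + 1) ≤ pvPS S v := pv_ps_mono S (by omega)
            omega
        rw [List.getD_eq_getElem?_getD, List.getElem?_set, if_neg (fun h => hne h.symm),
          ← List.getD_eq_getElem?_getD]
        exact harr v hv r hr'


lemma pv_seg (S fin : List Int) (hPre : ∀ b ∈ S, 0 ≤ b ∧ b < 256)
    (hlen : fin.length = S.length)
    (h : ∀ v : Nat, v < 256 → ∀ r : Nat, r < S.count (v : Int) →
      fin.getD (pvPS S v + r) 0 = (pvOcc S (v : Int)).getD r 0) :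
    fin = (List.range 256).flatMap (fun (v : Nat) => pvOcc S (v : Int)) := by
  have aux : ∀ u : Nat, u ≤ 256 →
      fin.take (pvPS S u) = (List.range u).flatMap (fun (v : Nat) => pvOcc S (v : Int)) := by
    intro u
    induction u with
    | zero =>
      intro _
      rw [pv_ps_zero S hPre, List.take_zero, List.range_zero, List.flatMap_nil]
    | succ u ih =>
      intro hu
      have hub : pvPS S u + S.count (u : Int) ≤ S.length := by
        have h1 := pv_ps_succ S u
        have h2 : pvPS S (u + 1) ≤ pvPS S 256 := pv_ps_mono S (by omega)
        have h3 := pv_ps_top S hPre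
        omega
      rw [pv_ps_succ, List.take_add, List.range_succ, List.flatMap_append,
        ih (by omega), List.flatMap_cons, List.flatMap_nil, List.append_nil]
      congr 1
      apply List.ext_getElem
      · rw [List.length_take, List.length_drop, pv_occ_len, hlen]
        omega
      · intro j hj1 hj2
        rw [List.getElem_take, List.getElem_drop]
        have hjc : j < S.count (u : Int) := by
          rw [pv_occ_len] at hj2
          exact hj2
        have hidx : pvPS S u + j < fin.length := by rw [hlen]; omega
        have hone := h u (by omega) j hjc
        rw [List.getD_eq_getElem?_getD, List.getElem?_eq_getElem hidx,
          List.getD_eq_getElem?_getD, List.getElem?_eq_getElem hj2] at hone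
        simpa using hone
  have h256 := aux 256 le_rfl
  rwa [pv_ps_top S hPre, ← hlen, List.take_length] at h256

lemma pv_flatMap_congr : ∀ (vs : List Nat) (f g : Nat → List Int),
    (∀ v ∈ vs, f v = g v) → vs.flatMap f = vs.flatMap g := by
  intro vs
  induction vs with
  | nil => intro f g _; rfl
  | cons v vs ih =>
    intro f g h
    rw [List.flatMap_cons, List.flatMap_cons, h v List.mem_cons_self,
      ih f g (fun w hw => h w (List.mem_cons_of_mem _ hw))]

lemma pv_flatMap_filter_perm (key : Int → Int) : ∀ (vs : List Nat) (l : List Int),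
    vs.Nodup → (∀ x ∈ l, ∃ v ∈ vs, key x = (v : Int)) →
    (vs.flatMap (fun (v : Nat) => l.filter (fun i => key i == (v : Int)))).Perm l := by
  intro vs
  induction vs with
  | nil =>
    intro l _ h
    have : l = [] := by
      cases l with
      | nil => rfl
      | cons x l =>
        obtain ⟨v, hv, _⟩ := h x List.mem_cons_self
        exact absurd hv (List.not_mem_nil)
    simp [this]
  | cons v vs ih =>
    intro l hnd h
    rw [List.flatMap_cons]
    have hnd' := (List.nodup_cons.mp hnd)
    have hcongr : vs.flatMap (fun (w : Nat) => l.filter (fun i => key i == (w : Int)))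
        = vs.flatMap (fun (w : Nat) => (l.filter (fun i => !(key i == (v : Int)))).filter
            (fun i => key i == (w : Int))) := by
      apply pv_flatMap_congr
      intro w hw
      rw [List.filter_filter]
      apply List.filter_congr
      intro x _
      by_cases hx : key x = (w : Int)
      · have hvw : ((w : Nat) : Int) ≠ ((v : Nat) : Int) := by
          have : w ≠ v := fun e => hnd'.1 (e ▸ hw)
          intro e
          exact this (by exact_mod_cast e)
        simp [hx, hvw]
      · simp [hx]
    rw [hcongr]
    have hih := ih (l.filter (fun i => !(key i == (v : Int)))) hnd'.2 ?_
    · exact ((List.Perm.append_left _ hih).trans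
        (List.filter_append_perm (fun i => key i == (v : Int)) l))
    · intro x hx
      rw [List.mem_filter] at hx
      obtain ⟨v', hv', he⟩ := h x hx.1
      rcases List.mem_cons.mp hv' with rfl | hmem
      · exfalso
        have := hx.2
        simp [he] at this
      · exact ⟨v', hmem, he⟩

def pvR (S : List Int) (a b : Int) : Prop :=
  pvKey S a < pvKey S b ∨ (pvKey S a = pvKey S b ∧ a < b)

lemma pv_insertBy_R (S : List Int) (x : Int) (ys : List Int)
    (h1 : ys.Pairwise (pvR S)) (h2 : ∀ y ∈ ys, y < x) :
    (PySem.List.insertBy (fun a b => decide (pvKey S a < pvKey S b)) x ys).Pairwise (pvR S) := by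
  induction ys with
  | nil => simp [PySem.List.insertBy]
  | cons y ys ih =>
    rw [List.pairwise_cons] at h1
    obtain ⟨hy, hys⟩ := h1
    by_cases hlt : pvKey S x < pvKey S y
    · rw [PySem.List.insertBy]
      simp only [hlt, decide_true, if_true]
      refine List.pairwise_cons.mpr ⟨?_, List.pairwise_cons.mpr ⟨hy, hys⟩⟩
      intro z hz
      rcases List.mem_cons.mp hz with rfl | hz
      · exact Or.inl hlt
      · rcases hy z hz with h' | ⟨h', _⟩
        · exact Or.inl (lt_trans hlt h')
        · exact Or.inl (h' ▸ hlt)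
    · rw [PySem.List.insertBy]
      simp only [hlt, decide_false]
      refine List.pairwise_cons.mpr ⟨?_, ih hys (fun z hz => h2 z (List.mem_cons_of_mem _ hz))⟩
      intro z hz
      rw [PySem.List.insertBy_mem_iff] at hz
      rcases hz with rfl | hz
      · rcases lt_or_eq_of_le (le_of_not_gt hlt) with h | h
        · exact Or.inl h
        · exact Or.inr ⟨h, h2 y List.mem_cons_self⟩
      · exact hy z hz

lemma pv_sorted_R (S : List Int) (xs : List Int) (hxs : xs.Pairwise (· < ·)) :
    ∀ (acc : List Int), acc.Pairwise (pvR S) → (∀ a ∈ acc, ∀ x ∈ xs, a < x) →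
    (xs.foldl (fun acc x => PySem.List.insertBy (fun a b => decide (pvKey S a < pvKey S b)) x acc) acc).Pairwise (pvR S) := by
  induction xs with
  | nil => intro acc h _; simpa using h
  | cons x xs ih =>
    intro acc hacc hcross
    rw [List.pairwise_cons] at hxs
    simp only [List.foldl_cons]
    refine ih hxs.2 _ (pv_insertBy_R S x acc hacc (fun y hy => hcross y hy x List.mem_cons_self)) ?_
    intro a ha z hz
    rw [PySem.List.insertBy_mem_iff] at ha
    rcases ha with rfl | ha
    · exact hxs.1 z hz
    · exact hcross a ha z (List.mem_cons_of_mem _ hz)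


lemma pv_T_pairwise (S : List Int) : ∀ (vs : List Nat), vs.Pairwise (· < ·) →
    (vs.flatMap (fun (v : Nat) => pvOcc S (v : Int))).Pairwise (pvR S) := by
  intro vs
  induction vs with
  | nil => intro _; simp
  | cons v vs ih =>
    intro hp
    rw [List.pairwise_cons] at hp
    rw [List.flatMap_cons, List.pairwise_append]
    refine ⟨?_, ih hp.2, ?_⟩
    · refine (pv_occ_pairwise S (v : Int)).imp_of_mem ?_
      intro a b ha hb hab
      have hka := (pv_occ_mem S _ a ha).1
      have hkb := (pv_occ_mem S _ b hb).1
      exact Or.inr ⟨hka.trans hkb.symm, hab⟩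
    · intro a ha c hc
      rw [List.mem_flatMap] at hc
      obtain ⟨w, hw, hcw⟩ := hc
      have hka := (pv_occ_mem S _ a ha).1
      have hkc := (pv_occ_mem S _ c hcw).1
      have hvw : v < w := hp.1 w hw
      left
      rw [hka, hkc]
      exact_mod_cast hvw

lemma pv_antisym (S : List Int) (a b : Int) (h1 : pvR S a b) (h2 : pvR S b a) : a = b := by
  rcases h1 with h1 | ⟨e1, h1⟩ <;> rcases h2 with h2 | ⟨e2, h2⟩ <;> omega

lemma pv_B_pairwise (S : List Int) :
    (counting_sort_arg_bytes_alt S).Pairwise (pvR S) := by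
  rw [counting_sort_arg_bytes_alt, PySem.List.sorted_eq_foldl_insertBy]
  exact pv_sorted_R S _ (PySem.List.pairwise_lt_pyRange_one _ _) [] List.Pairwise.nil
    (by intro a ha; exact absurd ha (List.not_mem_nil))

lemma pv_T_perm (S : List Int) (hPre : ∀ b ∈ S, 0 ≤ b ∧ b < 256) :
    ((List.range 256).flatMap (fun (v : Nat) => pvOcc S (v : Int))).Perm
      (PySem.List.pyRange 0 (S.length : Int) 1) := by
  apply pv_flatMap_filter_perm (pvKey S) (List.range 256) _ (List.nodup_range)
  intro x hx
  rw [PySem.List.mem_pyRange_one] at hx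
  have hxk : x.toNat < S.length := by omega
  have hkey : pvKey S x = S.getD x.toNat 0 := by
    rw [pvKey, PySem.List.pyGetD_of_nonneg _ _ hx.1]
  have hmem : S.getD x.toNat 0 ∈ S := by
    rw [List.getD_eq_getElem?_getD, List.getElem?_eq_getElem hxk]
    exact List.getElem_mem hxk
  obtain ⟨hb0, hb256⟩ := hPre _ hmem
  refine ⟨(pvKey S x).toNat, List.mem_range.mpr (by omega), by omega⟩

theorem pv_main (S : List Int) (hPre : ∀ b ∈ S, 0 ≤ b ∧ b < 256) :
    counting_sort_arg_bytes S = counting_sort_arg_bytes_alt S := by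
  by_cases hS : S.length = 0
  · have : S = [] := List.length_eq_zero_iff.mp hS
    subst this
    rfl
  · have hN : ((S.length : Int)) ≠ 0 := by omega
    -- characterize A
    obtain ⟨hclen, hcval⟩ := pv_counts_spec S (List.replicate 256 (0 : Int))
      (by rw [List.length_replicate]; exact fun b hb => ⟨(hPre b hb).1, by exact_mod_cast (hPre b hb).2⟩)
    rw [List.length_replicate] at hclen hcval
    set counts := S.foldl (fun c b => PySem.List.pySetD c b (PySem.List.pyGetD c b 0 + 1))
      (List.replicate 256 (0 : Int)) with hcounts
    have hcval' : ∀ v : Nat, v < 256 → counts.getD v 0 = (S.count (v : Int) : Int) := by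
      intro v hv
      rw [hcval v hv, pv_getD_replicate v, Int.zero_add]
    obtain ⟨hplen, hpval, _⟩ := pv_pos_spec counts 256 le_rfl
    have hc256 : (((256 : Nat) : Int)) = (256 : Int) := by norm_num
    rw [hc256] at hplen hpval
    set pos := (PySem.List.pyRange 1 (256 : Int) 1).foldl
      (fun p i => PySem.List.pySetD p i
        (PySem.List.pyGetD p (i - 1) 0 + PySem.List.pyGetD counts (i - 1) 0))
      (List.replicate 256 (0 : Int)) with hpos
    have hlink := pv_sum_eq_ps counts S hPre hcval'
    have htp0 : ∀ v : Nat, v < 256 →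
        pos.getD v 0 = (pvPS S v : Int) + ((S.take 0).count (v : Int) : Int) := by
      intro v hv
      rw [hpval v hv, hlink v (by omega), List.take_zero, List.count_nil]
      push_cast
      ring
    obtain ⟨hflen, hfval⟩ := pv_loop S hPre S 0 (List.replicate S.length (0 : Int)) pos
      rfl (by omega) List.length_replicate hplen htp0
      (by intro v hv r hr; rw [List.take_zero, List.count_nil] at hr; omega)
    have hA : counting_sort_arg_bytes S
        = (List.range 256).flatMap (fun (v : Nat) => pvOcc S (v : Int)) := by
      have hexp : counting_sort_arg_bytes S
          = ((PySem.List.enumerate S ((0 : Nat) : Int)).foldl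
            (fun (st : List Int × List Int) ib =>
              (PySem.List.pySetD st.1 (PySem.List.pyGetD st.2 ib.2 0) ib.1,
               PySem.List.pySetD st.2 ib.2 (PySem.List.pyGetD st.2 ib.2 0 + 1)))
            (List.replicate S.length (0 : Int), pos)).1 := by
        rw [counting_sort_arg_bytes]
        simp only [if_neg hN]
        rfl
      rw [hexp]
      exact pv_seg S _ hPre hflen hfval
    -- B equals the same canonical list
    have hperm : ((List.range 256).flatMap (fun (v : Nat) => pvOcc S (v : Int))).Perm
        (counting_sort_arg_bytes_alt S) :=
      (pv_T_perm S hPre).trans (PySem.List.sorted_perm _ _ _).symm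
    have hTp := pv_T_pairwise S (List.range 256) (List.pairwise_lt_range)
    have hBp := pv_B_pairwise S
    rw [hA]
    exact List.Perm.eq_of_pairwise (fun a b _ _ => pv_antisym S a b) hTp hBp hperm

lemma pv_pyIdx_neg (n : Nat) (b : Int) (h1 : -(n : Int) ≤ b) (h2 : b < 0) :
    PySem.List.pyIdx? n b = PySem.List.pyIdx? n (b + n) := by
  simp only [PySem.List.pyIdx?]
  rw [if_neg (by omega), if_pos h1, if_pos (by omega), if_pos (by omega)]
  congr 1
  omega

lemma pv_pyGetD_neg (c : List Int) (b : Int) (h1 : -(c.length : Int) ≤ b) (h2 : b < 0) :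
    PySem.List.pyGetD c b 0 = PySem.List.pyGetD c (b + c.length) 0 := by
  simp only [PySem.List.pyGetD, PySem.List.pyGet?]
  rw [pv_pyIdx_neg c.length b h1 h2]

lemma pv_pySetD_neg (c : List Int) (b : Int) (v : Int) (h1 : -(c.length : Int) ≤ b) (h2 : b < 0) :
    PySem.List.pySetD c b v = PySem.List.pySetD c (b + c.length) v := by
  simp only [PySem.List.pySetD, PySem.List.pySet?]
  rw [pv_pyIdx_neg c.length b h1 h2]

lemma pv_counts_shift : ∀ (l : List Int) (c : List Int), c.length = 256 →
    (∀ b ∈ l, -256 ≤ b ∧ b < 0) →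
    l.foldl (fun c b => PySem.List.pySetD c b (PySem.List.pyGetD c b 0 + 1)) c
      = (l.map (fun b => b + 256)).foldl
          (fun c b => PySem.List.pySetD c b (PySem.List.pyGetD c b 0 + 1)) c := by
  intro l
  induction l with
  | nil => intro c _ _; rfl
  | cons b l ih =>
    intro c hc hb
    obtain ⟨h1, h2⟩ := hb b List.mem_cons_self
    rw [List.map_cons, List.foldl_cons, List.foldl_cons,
      pv_pyGetD_neg c b (by omega) h2, pv_pySetD_neg c b _ (by omega) h2, hc]
    exact ih _ (by rw [PySem.List.length_pySetD, hc])
      (fun x hx => hb x (List.mem_cons_of_mem _ hx))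

lemma pv_enumerate_shift : ∀ (l : List Int) (s : Int),
    PySem.List.enumerate (l.map (fun b => b + 256)) s
      = (PySem.List.enumerate l s).map (fun p => (p.1, p.2 + 256)) := by
  intro l
  induction l with
  | nil => intro s; rfl
  | cons x l ih =>
    intro s
    rw [List.map_cons, PySem.List.enumerate_cons, PySem.List.enumerate_cons, ih (s + 1),
      List.map_cons]

lemma pv_loop_shift : ∀ (ps : List (Int × Int)) (arr tp : List Int), tp.length = 256 →
    (∀ p ∈ ps, -256 ≤ p.2 ∧ p.2 < 0) →
    ((ps.map (fun p => (p.1, p.2 + 256))).foldl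
      (fun (st : List Int × List Int) ib =>
        (PySem.List.pySetD st.1 (PySem.List.pyGetD st.2 ib.2 0) ib.1,
         PySem.List.pySetD st.2 ib.2 (PySem.List.pyGetD st.2 ib.2 0 + 1)))
      (arr, tp))
    = ps.foldl
      (fun (st : List Int × List Int) ib =>
        (PySem.List.pySetD st.1 (PySem.List.pyGetD st.2 ib.2 0) ib.1,
         PySem.List.pySetD st.2 ib.2 (PySem.List.pyGetD st.2 ib.2 0 + 1)))
      (arr, tp) := by
  intro ps
  induction ps with
  | nil => intro arr tp _ _; rfl
  | cons p ps ih =>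
    intro arr tp htp hb
    obtain ⟨h1, h2⟩ := hb p List.mem_cons_self
    rw [List.map_cons, List.foldl_cons, List.foldl_cons]
    have hg : PySem.List.pyGetD tp (p.2 + 256) 0 = PySem.List.pyGetD tp p.2 0 := by
      rw [pv_pyGetD_neg tp p.2 (by omega) h2, htp]
      norm_num
    have hs : PySem.List.pySetD tp (p.2 + 256) (PySem.List.pyGetD tp p.2 0 + 1)
        = PySem.List.pySetD tp p.2 (PySem.List.pyGetD tp p.2 0 + 1) := by
      rw [pv_pySetD_neg tp p.2 _ (by omega) h2, htp]
      norm_num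
    simp only [hg, hs]
    exact ih _ _ (by rw [PySem.List.length_pySetD, htp])
      (fun x hx => hb x (List.mem_cons_of_mem _ hx))

lemma pv_insertBy_congr (f g : Int → Int → Bool) (x : Int) : ∀ (ys : List Int),
    (∀ y ∈ ys, f x y = g x y) → PySem.List.insertBy f x ys = PySem.List.insertBy g x ys := by
  intro ys
  induction ys with
  | nil => intro _; rfl
  | cons y ys ih =>
    intro h
    rw [PySem.List.insertBy, PySem.List.insertBy, h y List.mem_cons_self,
      ih (fun z hz => h z (List.mem_cons_of_mem _ hz))]

lemma pv_foldl_insert_congr (f g : Int → Int → Bool) : ∀ (xs acc : List Int),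
    (∀ x y : Int, x ∈ xs → (y ∈ xs ∨ y ∈ acc) → f x y = g x y) →
    xs.foldl (fun acc x => PySem.List.insertBy f x acc) acc
      = xs.foldl (fun acc x => PySem.List.insertBy g x acc) acc := by
  intro xs
  induction xs with
  | nil => intro acc _; rfl
  | cons x xs ih =>
    intro acc h
    rw [List.foldl_cons, List.foldl_cons,
      pv_insertBy_congr f g x acc
        (fun y hy => h x y List.mem_cons_self (Or.inr hy))]
    apply ih
    intro a y ha hy
    refine h a y (List.mem_cons_of_mem _ ha) ?_
    rcases hy with hy | hy
    · exact Or.inl (List.mem_cons_of_mem _ hy)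
    · rcases (PySem.List.insertBy_mem_iff g x y acc).mp hy with rfl | hy
      · exact Or.inl List.mem_cons_self
      · exact Or.inr hy

lemma pv_key_shift (S : List Int) (i : Int) (h0 : 0 ≤ i) (hl : i < (S.length : Int)) :
    PySem.List.pyGetD (S.map (fun b => b + 256)) i 0 = PySem.List.pyGetD S i 0 + 256 := by
  rw [PySem.List.pyGetD_of_nonneg _ _ h0, PySem.List.pyGetD_of_nonneg _ _ h0]
  have hi : i.toNat < S.length := by omega
  rw [List.getD_eq_getElem?_getD, List.getD_eq_getElem?_getD,
    List.getElem?_eq_getElem (by simpa using hi), List.getElem?_eq_getElem hi]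
  simp

lemma pv_alt_shift (S : List Int) :
    counting_sort_arg_bytes_alt (S.map (fun b => b + 256)) = counting_sort_arg_bytes_alt S := by
  rw [counting_sort_arg_bytes_alt, counting_sort_arg_bytes_alt, List.length_map,
    PySem.List.sorted_eq_foldl_insertBy, PySem.List.sorted_eq_foldl_insertBy]
  apply pv_foldl_insert_congr
  intro x y hx hy
  have hy' : y ∈ PySem.List.pyRange 0 (S.length : Int) 1 := by
    rcases hy with hy | hy
    · exact hy
    · exact absurd hy List.not_mem_nil
  rw [PySem.List.mem_pyRange_one] at hx hy'
  rw [pv_key_shift S x hx.1 hx.2, pv_key_shift S y hy'.1 hy'.2]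
  exact decide_eq_decide.mpr (by omega)

theorem pv_A_shift (S : List Int) (hneg : ∀ b ∈ S, -256 ≤ b ∧ b < 0) :
    counting_sort_arg_bytes S = counting_sort_arg_bytes (S.map (fun b => b + 256)) := by
  by_cases hS : S.length = 0
  · rw [List.length_eq_zero_iff.mp hS]
    rfl
  · have hN : ((S.length : Int)) ≠ 0 := by omega
    set cS := S.foldl (fun c b => PySem.List.pySetD c b (PySem.List.pyGetD c b 0 + 1))
      (List.replicate 256 (0 : Int)) with hcS
    have hcount : (S.map (fun b => b + 256)).foldl
        (fun c b => PySem.List.pySetD c b (PySem.List.pyGetD c b 0 + 1))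
        (List.replicate 256 (0 : Int)) = cS := by
      rw [hcS]
      exact (pv_counts_shift S _ List.length_replicate hneg).symm
    set posS := (PySem.List.pyRange 1 (256 : Int) 1).foldl
      (fun p i => PySem.List.pySetD p i
        (PySem.List.pyGetD p (i - 1) 0 + PySem.List.pyGetD cS (i - 1) 0))
      (List.replicate 256 (0 : Int)) with hposS
    have hposlen : posS.length = 256 := by
      have h := (pv_pos_spec cS 256 le_rfl).1
      have hc256 : (((256 : Nat) : Int)) = (256 : Int) := by norm_num
      rw [hc256] at h
      exact h
    have eS : counting_sort_arg_bytes S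
        = ((PySem.List.enumerate S ((0 : Nat) : Int)).foldl
          (fun (st : List Int × List Int) ib =>
            (PySem.List.pySetD st.1 (PySem.List.pyGetD st.2 ib.2 0) ib.1,
             PySem.List.pySetD st.2 ib.2 (PySem.List.pyGetD st.2 ib.2 0 + 1)))
          (List.replicate S.length (0 : Int), posS)).1 := by
      rw [counting_sort_arg_bytes]
      simp only [if_neg hN]
      rfl
    have eS' : counting_sort_arg_bytes (S.map (fun b => b + 256))
        = ((PySem.List.enumerate (S.map (fun b => b + 256)) ((0 : Nat) : Int)).foldl
          (fun (st : List Int × List Int) ib =>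
            (PySem.List.pySetD st.1 (PySem.List.pyGetD st.2 ib.2 0) ib.1,
             PySem.List.pySetD st.2 ib.2 (PySem.List.pyGetD st.2 ib.2 0 + 1)))
          (List.replicate S.length (0 : Int), posS)).1 := by
      rw [counting_sort_arg_bytes]
      simp only [List.length_map, if_neg hN]
      rw [hcount]
      rfl
    have hmem : ∀ p ∈ PySem.List.enumerate S ((0 : Nat) : Int), -256 ≤ p.2 ∧ p.2 < 0 := by
      intro p hp
      rw [PySem.List.mem_enumerate_iff] at hp
      obtain ⟨k, hk, rfl⟩ := hp
      exact hneg _ (List.getElem_mem hk)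
    rw [eS, eS', pv_enumerate_shift, pv_loop_shift _ _ _ hposlen hmem]

theorem pv_main2 (S : List Int) (hPre : Pre_counting_sort_arg_bytes S) :
    counting_sort_arg_bytes S = counting_sort_arg_bytes_alt S := by
  obtain ⟨hb, hsign | hsign⟩ := hPre
  · exact pv_main S (fun b h => ⟨hsign b h, (hb b h).2⟩)
  · have hneg : ∀ b ∈ S, -256 ≤ b ∧ b < 0 := fun b h => ⟨(hb b h).1, hsign b h⟩
    calc counting_sort_arg_bytes S
        = counting_sort_arg_bytes (S.map (fun b => b + 256)) := pv_A_shift S hneg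
      _ = counting_sort_arg_bytes_alt (S.map (fun b => b + 256)) := by
          apply pv_main
          intro b hbm
          rw [List.mem_map] at hbm
          obtain ⟨a, ha, rfl⟩ := hbm
          have := hneg a ha
          omega
      _ = counting_sort_arg_bytes_alt S := pv_alt_shift S

-- ===== VERDICT (by name: the statement is the Claim_ definition above) =====
theorem counting_sort_arg_bytes_spec : Claim_equal_counting_sort_arg_bytes := by
  intro S _ hPre
  unfold Spec_counting_sort_arg_bytes
  exact pv_main2 S hPre
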